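-- pv_equiv track=rewrite | github.com/ordli77/signatures | src/.ipynb_checkpoints/utils-checkpoint.py | find_p_q
-- ===== SOURCE A (Python) =====
-- def find_p_q(n):
--     results = [(n,1)]
--
--     q = 1
--     while (2 * q) <= n:
--         if n % (2 * q) == 0:  # Check if n is divisible by 2 * q
--             p = n // (2 * q)
--             results.append((p, q))
--         q += 1
--
--     return results
-- ===== SOURCE B (Python) =====
-- def find_p_q(n):
--     # Enumerate divisors in pairs up to sqrt(n), keep the even ones sorted ascending:
--     # each even divisor d gives p = n // d, q = d // 2.
--     results = [(n, 1)]
--     divs = []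
--     i = 1
--     while i * i <= n:
--         if n % i == 0:
--             divs.append(i)
--             if n // i != i:
--                 divs.append(n // i)
--         i += 1
--     for d in sorted(d for d in divs if d % 2 == 0):
--         results.append((n // d, d // 2))
--     return results
-- ===== Notes on version B (the rewrite author's own statement) =====
-- stated objective: faster
-- what changed: B replaces A's O(n) scan over all q with 2q<=n by trial division up to sqrt(n) collecting divisor pairs, then filters the even divisors and sorts them ascending to recover A's output order.
import Mathlib
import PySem

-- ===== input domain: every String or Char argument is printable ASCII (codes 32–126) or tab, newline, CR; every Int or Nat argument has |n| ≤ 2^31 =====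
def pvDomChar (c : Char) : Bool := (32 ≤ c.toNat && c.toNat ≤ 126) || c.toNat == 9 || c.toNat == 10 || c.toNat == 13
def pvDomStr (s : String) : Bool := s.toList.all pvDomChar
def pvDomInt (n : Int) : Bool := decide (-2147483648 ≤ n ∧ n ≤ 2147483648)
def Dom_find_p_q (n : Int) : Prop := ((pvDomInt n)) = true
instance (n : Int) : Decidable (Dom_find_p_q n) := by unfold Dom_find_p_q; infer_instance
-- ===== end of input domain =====

-- B enumerates divisor pairs up to sqrt(n) instead of scanning all q with 2q <= n (faster: asymptotic).

-- ===== PORT A =====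
-- while (2*q) <= n: if n % (2*q) == 0: results.append((n // (2*q), q)); q += 1
def findLoopA (n q : Int) (acc : List (List Int)) : List (List Int) :=
  if _h : 2 * q ≤ n then
    findLoopA n (q + 1)
      (if PySem.Int.mod n (2 * q) == 0 then acc ++ [[PySem.Int.floordiv n (2 * q), q]] else acc)
  else acc
termination_by (n + 1 - 2 * q).toNat
decreasing_by omega

def find_p_q (n : Int) : List (List Int) := findLoopA n 1 [[n, 1]]

-- ===== PORT B =====
-- while i*i <= n: collect divisor pair (i, n//i); the '1 ≤ i' conjunct only makes the
-- recursion total (the loop is only ever entered with i = 1).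
def divLoopB (n i : Int) (acc : List Int) : List Int :=
  if _h : 1 ≤ i ∧ i * i ≤ n then
    divLoopB n (i + 1)
      (if PySem.Int.mod n i == 0 then
          acc ++ i :: (if PySem.Int.floordiv n i != i then [PySem.Int.floordiv n i] else [])
        else acc)
  else acc
termination_by (n + 1 - i).toNat
decreasing_by
  have : i ≤ i * i := le_mul_of_one_le_left (by omega) _h.1
  omega

def find_p_q_alt (n : Int) : List (List Int) :=
  [n, 1] ::
    (PySem.List.sorted ((divLoopB n 1 []).filter (fun d => PySem.Int.mod d 2 == 0)) (fun d => d) false).map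
      (fun d => [PySem.Int.floordiv n d, PySem.Int.floordiv d 2])

-- ===== PRECONDITION & SPEC =====
def Spec_find_p_q (n : Int) (out : List (List Int)) : Prop := out = find_p_q_alt n
instance (n : Int) (out : List (List Int)) : Decidable (Spec_find_p_q n out) := by unfold Spec_find_p_q; infer_instance

-- ===== CLAIM (what is proved, stated in full; the proofs are below) =====
def Claim_equal_find_p_q : Prop := ∀ (n : Int), Dom_find_p_q n → Spec_find_p_q n (find_p_q n)

-- ===== LEMMAS AND PROOFS =====

-- proof-side view of B's loop: the same divisor list built without the accumulator
def divList (n i : Int) : List Int :=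
  if _h : 1 ≤ i ∧ i * i ≤ n then
    (if PySem.Int.mod n i == 0 then
        i :: (if PySem.Int.floordiv n i != i then [PySem.Int.floordiv n i] else [])
      else [])
      ++ divList n (i + 1)
  else []
termination_by (n + 1 - i).toNat
decreasing_by
  have : i ≤ i * i := le_mul_of_one_le_left (by omega) _h.1
  omega

lemma divLoopB_eq (n i : Int) (acc : List Int) : divLoopB n i acc = acc ++ divList n i := by
  fun_induction divLoopB n i acc with
  | case1 i acc h ih =>
      simp only [dite_eq_ite] at ih
      rw [divList, dif_pos h]
      by_cases hd : PySem.Int.mod n i == 0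
      · simp only [hd, if_true] at ih ⊢
        rw [ih, List.append_assoc]
      · simp only [hd, Bool.false_eq_true, if_false] at ih ⊢
        rw [ih, List.nil_append]
  | case2 i acc h =>
      rw [divList, dif_neg h]
      simp

-- the list of valid q values, ascending
def qTgt (n : Int) : List Int :=
  (PySem.List.pyRange 1 (PySem.Int.floordiv n 2 + 1) 1).filter (fun q => PySem.Int.mod n (2 * q) == 0)

lemma findLoopA_eq (n q : Int) (acc : List (List Int)) :
    findLoopA n q acc =
      acc ++ ((PySem.List.pyRange q (PySem.Int.floordiv n 2 + 1) 1).filter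
          (fun q' => PySem.Int.mod n (2 * q') == 0)).map
        (fun q' => [PySem.Int.floordiv n (2 * q'), q']) := by
  fun_induction findLoopA n q acc with
  | case1 q acc h ih =>
      have hq : q ≤ PySem.Int.floordiv n 2 :=
        (PySem.Int.le_floordiv_iff_mul_le (by omega)).mpr (by omega)
      simp only [dite_eq_ite] at ih
      rw [PySem.List.pyRange_one_cons (by omega), List.filter_cons]
      by_cases hm : PySem.Int.mod n (2 * q) == 0
      · simp only [hm, if_true] at ih ⊢
        rw [ih, List.append_assoc]
        simp
      · simp only [hm, Bool.false_eq_true, if_false] at ih ⊢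
        rw [ih]
  | case2 q acc h =>
      rw [PySem.List.pyRange_one_eq_nil (by
        have : PySem.Int.floordiv n 2 < q :=
          (PySem.Int.floordiv_lt_iff_lt_mul (by omega)).mpr (by omega)
        omega)]
      simp

lemma mem_qTgt (n x : Int) : x ∈ qTgt n ↔ 1 ≤ x ∧ 2 * x ≤ n ∧ (2 * x) ∣ n := by
  unfold qTgt
  simp only [List.mem_filter, PySem.List.mem_pyRange_one, beq_iff_eq,
    PySem.Int.mod_eq_zero_iff_dvd]
  constructor
  · rintro ⟨⟨h1, h2⟩, h3⟩
    have : x ≤ PySem.Int.floordiv n 2 := by omega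
    have := (PySem.Int.le_floordiv_iff_mul_le (a := n) (b := 2) (by omega)).mp this
    exact ⟨h1, by omega, h3⟩
  · rintro ⟨h1, h2, h3⟩
    have : x ≤ PySem.Int.floordiv n 2 :=
      (PySem.Int.le_floordiv_iff_mul_le (by omega)).mpr (by omega)
    exact ⟨⟨h1, by omega⟩, h3⟩

lemma pairwise_qTgt (n : Int) : (qTgt n).Pairwise (· < ·) := by
  exact (PySem.List.pairwise_lt_pyRange_one _ _).filter _

lemma mem_divList (n i x : Int) (hn : 1 ≤ n) (hi : 1 ≤ i) :
    x ∈ divList n i ↔ x ∣ n ∧ 1 ≤ x ∧ ((i ≤ x ∧ x * x ≤ n) ∨ (n ≤ x * x ∧ i * x ≤ n)) := by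
  revert hi
  induction i using divList.induct (n := n) with
  | case1 i h ih =>
      intro _
      obtain ⟨hi, hii⟩ := h
      have ih := ih (by omega)
      rw [divList, dif_pos ⟨hi, hii⟩]
      simp only [List.mem_append, ih]
      constructor
      · rintro (hmem | hR)
        · -- collected at this step
          by_cases hd : PySem.Int.mod n i == 0
          · rw [if_pos hd] at hmem
            rw [beq_iff_eq, PySem.Int.mod_eq_zero_iff_dvd] at hd
            rw [PySem.Int.floordiv_eq_ediv_of_pos (by omega)] at hmem
            have hk : n / i * i = n := Int.ediv_mul_cancel hd
            simp only [List.mem_cons, bne_iff_ne, ne_eq] at hmem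
            rcases hmem with rfl | hmem
            · exact ⟨hd, by omega, Or.inl ⟨le_refl _, hii⟩⟩
            · have hx : x = n / i := by
                by_cases hne : n / i = i
                · simp [hne] at hmem
                · simpa [hne] using hmem
              subst hx
              have hk1 : 1 ≤ n / i := by nlinarith
              refine ⟨Dvd.intro i (by linarith [hk]), hk1, Or.inr ⟨?_, by nlinarith [hk, mul_comm i (n / i)]⟩⟩
              have hik : i ≤ n / i := by nlinarith
              nlinarith
          · rw [if_neg hd] at hmem; simp at hmem
        · obtain ⟨h1, h2, h3⟩ := hR
          refine ⟨h1, h2, ?_⟩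
          rcases h3 with ⟨ha, hb⟩ | ⟨ha, hb⟩
          · exact Or.inl ⟨by omega, hb⟩
          · exact Or.inr ⟨ha, by nlinarith⟩
      · rintro ⟨hdvd, hx1, hcase⟩
        rcases hcase with ⟨hix, hxx⟩ | ⟨hnx, hixn⟩
        · -- small side
          by_cases hxi : x = i
          · subst hxi
            left
            rw [if_pos (by rw [beq_iff_eq, PySem.Int.mod_eq_zero_iff_dvd]; exact hdvd)]
            simp
          · right; exact ⟨hdvd, hx1, Or.inl ⟨by omega, hxx⟩⟩
        · by_cases hnext : (i + 1) * x ≤ n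
          · right; exact ⟨hdvd, hx1, Or.inr ⟨hnx, hnext⟩⟩
          · -- then n = i * x, so x = n // i
            obtain ⟨m, hm⟩ := hdvd
            have hmi : m = i := by
              rcases lt_trichotomy m i with hlt | heq | hgt
              · nlinarith
              · exact heq
              · nlinarith
            rw [hmi] at hm
            have hdi : i ∣ n := ⟨x, by rw [hm, mul_comm]⟩
            left
            rw [if_pos (by rw [beq_iff_eq, PySem.Int.mod_eq_zero_iff_dvd]; exact hdi)]
            rw [PySem.Int.floordiv_eq_ediv_of_pos (by omega)]
            have hx : n / i = x := by
              rw [hm]; exact Int.mul_ediv_cancel _ (by omega)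
            by_cases hxi : x = i
            · simp [hx, hxi]
            · simp only [List.mem_cons, bne_iff_ne, ne_eq, hx]
              right
              simp [hxi]
      | case2 i h =>
        intro hi
        rw [divList, dif_neg h]
        simp only [List.not_mem_nil, false_iff]
        rintro ⟨hdvd, hx1, hcase⟩
        have hii : n < i * i := by
          rcases not_and_or.mp h with h1 | h1
          · omega
          · omega
        rcases hcase with ⟨hix, hxx⟩ | ⟨hnx, hixn⟩
        · nlinarith
        · nlinarith

lemma nodup_divList (n i : Int) (hi : 1 ≤ i) : (divList n i).Nodup := by
  revert hi
  induction i using divList.induct (n := n) with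
  | case1 i h ih =>
      intro _
      obtain ⟨hi, hii⟩ := h
      have hn : 1 ≤ n := by nlinarith
      rw [divList, dif_pos ⟨hi, hii⟩]
      have hrec := ih (by omega)
      have hmem : ∀ y, y ∈ divList n (i + 1) →
          y ∣ n ∧ 1 ≤ y ∧ ((i + 1 ≤ y ∧ y * y ≤ n) ∨ (n ≤ y * y ∧ (i + 1) * y ≤ n)) :=
        fun y hy => (mem_divList n (i + 1) y hn (by omega)).mp hy
      have hiN : i ∉ divList n (i + 1) := by
        intro hmem'
        obtain ⟨_, _, hc⟩ := hmem _ hmem'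
        rcases hc with ⟨ha, hb⟩ | ⟨ha, hb⟩
        · omega
        · nlinarith
      by_cases hd : PySem.Int.mod n i == 0
      · rw [if_pos hd]
        rw [beq_iff_eq, PySem.Int.mod_eq_zero_iff_dvd] at hd
        rw [PySem.Int.floordiv_eq_ediv_of_pos (by omega)]
        have hk : n / i * i = n := Int.ediv_mul_cancel hd
        by_cases hne : n / i = i
        · simp only [hne, bne_self_eq_false, Bool.false_eq_true, if_false, List.nil_append,
            List.cons_append, List.nodup_cons]
          exact ⟨hiN, hrec⟩
        · have hik : i < n / i := by
            have : i ≤ n / i := by nlinarith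
            omega
          have hkN : n / i ∉ divList n (i + 1) := by
            intro hmem'
            obtain ⟨_, _, hc⟩ := hmem _ hmem'
            rcases hc with ⟨ha, hb⟩ | ⟨ha, hb⟩
            · nlinarith
            · nlinarith
          simp only [bne_iff_ne, ne_eq, hne, not_false_iff, if_true, List.cons_append,
            List.nodup_cons, List.mem_cons]
          refine ⟨?_, hkN, hrec⟩
          rintro (heq | hmem')
          · exact hne heq.symm
          · exact hiN hmem'
      · rw [if_neg hd]
        simpa using hrec
  | case2 i h =>
      intro _
      rw [divList, dif_neg h]
      simp

lemma mem_filter_evens (n x : Int) :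
    x ∈ (divList n 1).filter (fun d => PySem.Int.mod d 2 == 0) ↔
      x ∈ (qTgt n).map (fun q => 2 * q) := by
  by_cases hn : 1 ≤ n
  · simp only [List.mem_filter, List.mem_map, mem_qTgt, beq_iff_eq,
      PySem.Int.mod_eq_zero_iff_dvd, mem_divList n 1 x hn le_rfl]
    constructor
    · rintro ⟨⟨hdvd, hx1, _⟩, h2⟩
      obtain ⟨q, rfl⟩ := h2
      have hxn : 2 * q ≤ n := Int.le_of_dvd (by omega) hdvd
      exact ⟨q, ⟨by omega, hxn, hdvd⟩, rfl⟩
    · rintro ⟨q, ⟨hq1, hq2, hq3⟩, rfl⟩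
      refine ⟨⟨hq3, by omega, ?_⟩, ⟨q, rfl⟩⟩
      rcases le_total ((2 * q) * (2 * q)) n with hle | hle
      · exact Or.inl ⟨by omega, hle⟩
      · exact Or.inr ⟨hle, by omega⟩
  · have h1 : divList n 1 = [] := by
      rw [divList, dif_neg]
      rintro ⟨-, hc⟩
      omega
    have h2 : qTgt n = [] := by
      unfold qTgt
      rw [PySem.List.pyRange_one_eq_nil (by
        have : PySem.Int.floordiv n 2 < 1 :=
          (PySem.Int.floordiv_lt_iff_lt_mul (by omega)).mpr (by omega)
        omega)]
      rfl
    simp [h1, h2]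

lemma sorted_evens_eq (n : Int) :
    PySem.List.sorted ((divLoopB n 1 []).filter (fun d => PySem.Int.mod d 2 == 0)) (fun d => d) false
      = (qTgt n).map (fun q => 2 * q) := by
  rw [divLoopB_eq, List.nil_append]
  apply PySem.List.sorted_eq_of_perm_of_pairwise_lt
  · refine (List.perm_ext_iff_of_nodup ?_ ?_).mpr (fun x => (mem_filter_evens n x).symm)
    · exact List.Pairwise.imp ne_of_lt
        (List.pairwise_map.mpr ((pairwise_qTgt n).imp (by omega)))
    · exact (nodup_divList n 1 le_rfl).filter _
  · exact List.pairwise_map.mpr ((pairwise_qTgt n).imp (by omega))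

theorem find_p_q_eq (n : Int) : find_p_q n = find_p_q_alt n := by
  unfold find_p_q find_p_q_alt
  rw [sorted_evens_eq, findLoopA_eq, List.map_map]
  show [n, 1] :: (qTgt n).map _ = _ :: (qTgt n).map _
  congr 1
  apply List.map_congr_left
  intro q _
  have h2 : PySem.Int.floordiv (2 * q) 2 = q :=
    (PySem.Int.floordiv_eq_iff_of_pos (by omega)).mpr ⟨by omega, by omega⟩
  simp only [Function.comp_apply, h2]

-- ===== VERDICT (by name: the statement is the Claim_ definition above) =====
theorem find_p_q_spec : Claim_equal_find_p_q := by
  intro n _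
  unfold Spec_find_p_q
  exact find_p_q_eq n
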